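-- pv_equiv track=rewrite | github.com/MrCoding-cl/lab3_algoritmos | test.py | purificar
-- ===== SOURCE A (Python) =====
-- def purificar(lista,contador=0,listaaux=None):
--     """Esta funcion elimina de la permutacion todos los que tenga un 1 al principcio d ela lista"""
--     largo = len(lista) - 1
--     if listaaux is None:
--         listaaux = []
--
--     if len(lista) == 0:
--         return []
--
--
--     if lista[contador][0]==1:
--         listaaux.append(lista[contador])
--
--     if contador==largo:
--         return listaaux
--
--     else:
--         return purificar(lista,contador+1,listaaux)
-- ===== SOURCE B (Python) =====
-- def purificar(lista, contador=0, listaaux=None):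
--     """Iterative version: single loop from contador to the end of lista."""
--     if listaaux is None:
--         listaaux = []
--     if len(lista) == 0:
--         return []
--     for i in range(contador, len(lista)):
--         if lista[i][0] == 1:
--             listaaux.append(lista[i])
--     return listaaux
-- ===== Notes on version B (the rewrite author's own statement) =====
-- stated objective: simpler
-- what changed: Replaced the tail recursion that threads (contador, listaaux) through nested calls by a single iterative for-loop over range(contador, len(lista)) appending matches to the accumulator.
import Mathlib
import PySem

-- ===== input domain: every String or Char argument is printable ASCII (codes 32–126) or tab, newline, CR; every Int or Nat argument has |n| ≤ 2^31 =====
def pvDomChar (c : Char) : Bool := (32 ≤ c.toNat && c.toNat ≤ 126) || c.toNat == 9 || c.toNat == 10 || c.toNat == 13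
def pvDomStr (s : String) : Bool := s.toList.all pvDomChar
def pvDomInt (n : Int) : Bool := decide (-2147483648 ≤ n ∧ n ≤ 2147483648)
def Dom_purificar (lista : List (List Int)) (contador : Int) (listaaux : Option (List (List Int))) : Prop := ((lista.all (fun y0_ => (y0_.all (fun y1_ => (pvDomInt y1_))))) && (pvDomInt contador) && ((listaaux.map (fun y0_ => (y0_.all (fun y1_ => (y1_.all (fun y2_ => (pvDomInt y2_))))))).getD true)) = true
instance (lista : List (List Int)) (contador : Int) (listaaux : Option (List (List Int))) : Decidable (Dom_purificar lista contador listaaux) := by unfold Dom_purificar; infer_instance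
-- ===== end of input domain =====

-- B replaces A's tail recursion by a single iterative loop over range(contador, len(lista)); equivalence is about
-- the RETURN value only (both Pythons mutate the passed-in listaaux by appending, identically on Pre_).

-- ===== PORT A =====
-- A's recursion, step for step; where Python would raise IndexError (pyGet? = none / empty sublist)
-- the port returns [] as a dummy — those inputs are outside Pre_purificar.
def purificarGo (lista : List (List Int)) (contador : Int) (aux : List (List Int)) : List (List Int) :=
  let largo : Int := (lista.length : Int) - 1
  if lista.length = 0 then []
  else
    match h : PySem.List.pyGet? lista contador with
    | none => []          -- IndexError (outside Pre_)
    | some x =>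
      match x.head? with
      | none => []        -- IndexError on lista[contador][0] (outside Pre_)
      | some h0 =>
        let aux' := if h0 = 1 then aux ++ [x] else aux
        if contador = largo then aux'
        else purificarGo lista (contador + 1) aux'
termination_by ((lista.length : Int) - 1 - contador).toNat
decreasing_by
  have hr : ¬ ((PySem.List.pyGet? lista contador) = none) := by simp [h]
  rw [PySem.List.pyGet?_eq_none_iff] at hr
  simp [PySem.Raise.InRange] at hr
  omega

def purificar (lista : List (List Int)) (contador : Int) (listaaux : Option (List (List Int))) : List (List Int) :=
  purificarGo lista contador (listaaux.getD [])

-- ===== PORT B =====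
def purificar_alt (lista : List (List Int)) (contador : Int) (listaaux : Option (List (List Int))) : List (List Int) :=
  if lista.length = 0 then []
  else
    (PySem.List.pyRange contador (lista.length : Int) 1).foldl
      (fun aux i =>
        let x := (PySem.List.pyGet? lista i).getD []
        if x.head?.getD 0 = 1 then aux ++ [x] else aux)
      (listaaux.getD [])

-- ===== PRECONDITION & SPEC =====
-- Pre_ excludes exactly the inputs on which Python A raises IndexError: a nonempty lista with
-- contador outside [-len, len), or some visited element lista[i] (i in range(contador, len)) empty.
def Pre_purificar (lista : List (List Int)) (contador : Int) (listaaux : Option (List (List Int))) : Prop :=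
  lista = [] ∨
    (-(lista.length : Int) ≤ contador ∧ contador < (lista.length : Int) ∧
     ∀ i ∈ PySem.List.pyRange contador (lista.length : Int) 1,
       (PySem.List.pyGet? lista i).getD [] ≠ [])
instance (lista : List (List Int)) (contador : Int) (listaaux : Option (List (List Int))) : Decidable (Pre_purificar lista contador listaaux) := by unfold Pre_purificar; infer_instance

def pvWitness_purificar : List (List Int) × Int × Option (List (List Int)) := ([[1, 2], [0, 3], [1]], 0, none)

def Spec_purificar (lista : List (List Int)) (contador : Int) (listaaux : Option (List (List Int))) (out : List (List Int)) : Prop := out = purificar_alt lista contador listaaux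
instance (lista : List (List Int)) (contador : Int) (listaaux : Option (List (List Int))) (out : List (List Int)) : Decidable (Spec_purificar lista contador listaaux out) := by unfold Spec_purificar; infer_instance

-- ===== CLAIM (what is proved, stated in full; the proofs are below) =====
def Claim_equal_purificar : Prop := ∀ (lista : List (List Int)) (contador : Int) (listaaux : Option (List (List Int))), Dom_purificar lista contador listaaux → Pre_purificar lista contador listaaux → Spec_purificar lista contador listaaux (purificar lista contador listaaux)


-- ===== LEMMAS AND PROOFS =====

-- Main invariant: under the in-range / nonempty-elements hypotheses, the recursion equals the fold over pyRange.
lemma purificarGo_eq_foldl (lista : List (List Int)) (contador : Int) (aux : List (List Int))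
    (hne : lista ≠ [])
    (hlo : -(lista.length : Int) ≤ contador) (hhi : contador < (lista.length : Int))
    (hvis : ∀ i ∈ PySem.List.pyRange contador (lista.length : Int) 1,
       (PySem.List.pyGet? lista i).getD [] ≠ []) :
    purificarGo lista contador aux =
      (PySem.List.pyRange contador (lista.length : Int) 1).foldl
        (fun aux i =>
          let x := (PySem.List.pyGet? lista i).getD []
          if x.head?.getD 0 = 1 then aux ++ [x] else aux)
        aux := by
  generalize hm : ((lista.length : Int) - contador).toNat = m
  induction m generalizing contador aux with
  | zero => omega
  | succ n ih =>
    rw [purificarGo]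
    rw [if_neg (by simpa [List.length_eq_zero_iff] using hne)]
    rcases hx : PySem.List.pyGet? lista contador with _ | x
    · exfalso
      rw [PySem.List.pyGet?_eq_none_iff] at hx
      simp [PySem.Raise.InRange] at hx
      omega
    · have hxne : x ≠ [] := by
        have := hvis contador (by rw [PySem.List.mem_pyRange_one]; omega)
        simpa [hx] using this
      rcases x with _ | ⟨h0, t⟩
      · exact absurd rfl hxne
      rw [PySem.List.pyRange_one_cons hhi, List.foldl_cons]
      simp only [hx, List.head?_cons, Option.getD_some]
      by_cases hstop : contador = (lista.length : Int) - 1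
      · rw [if_pos hstop]
        rw [PySem.List.pyRange_one_eq_nil (by omega), List.foldl_nil]
      · rw [if_neg hstop]
        exact ih (contador + 1) _ (by omega) (by omega)
          (fun i hi => hvis i (by rw [PySem.List.mem_pyRange_one] at hi ⊢; omega)) (by omega)

theorem purificar_spec : Claim_equal_purificar := by
  intro lista contador listaaux _ hpre
  unfold Spec_purificar purificar purificar_alt
  rcases hpre with h | ⟨hlo, hhi, hvis⟩
  · subst h; simp [purificarGo]
  · have hne : lista ≠ [] := by
      intro h; subst h; simp at hlo hhi; omega
    rw [if_neg (by simpa using hne)]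
    exact purificarGo_eq_foldl lista contador (listaaux.getD []) hne hlo hhi hvis
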